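-- pv_equiv track=rewrite | github.com/DavidCheuk/PlugPipe-Plugins | plugs/security/cyberpig_ai/1.0.0/main_original_backup.py | _mask_for_analysis
-- ===== SOURCE A (Python) =====
-- def _mask_for_analysis(text: str) -> str:
--     """Mask text for safe LLM analysis while preserving analytical features"""
--     if len(text) <= 8:
--         return '*' * len(text)
--
--     # Preserve structure while masking sensitive parts
--     # Show pattern: first 2 chars + pattern info + last 2 chars
--     start = text[:2]
--     end = text[-2:] if len(text) > 4 else ""
--     middle_length = len(text) - len(start) - len(end)
--
--     # Analyze character composition for pattern recognition
--     has_uppercase = any(c.isupper() for c in text)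
--     has_lowercase = any(c.islower() for c in text)
--     has_digits = any(c.isdigit() for c in text)
--     has_special = any(not c.isalnum() for c in text)
--
--     # Create pattern description
--     pattern = f"[{middle_length}chars:"
--     if has_uppercase: pattern += "A"
--     if has_lowercase: pattern += "a"
--     if has_digits: pattern += "1"
--     if has_special: pattern += "!"
--     pattern += "]"
--
--     return f"{start}{pattern}{end}"
-- ===== SOURCE B (Python) =====
-- # flags via per-character bitmask OR and a precomputed 16-entry lookup table
-- _FLAG_TABLE = ["", "A", "a", "Aa", "1", "A1", "a1", "Aa1",
--                "!", "A!", "a!", "Aa!", "1!", "A1!", "a1!", "Aa1!"]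
--
-- def _classify(c: str) -> int:
--     if c.isupper(): return 1
--     if c.islower(): return 2
--     if c.isdigit(): return 4
--     if c.isalnum(): return 0
--     return 8
--
-- def _mask_for_analysis(text: str) -> str:
--     """Mask text for safe LLM analysis while preserving analytical features"""
--     n = len(text)
--     if n <= 8:
--         return '*' * n
--     bits = 0
--     for c in text:
--         bits |= _classify(c)
--     return text[:2] + '[' + str(n - 4) + 'chars:' + _FLAG_TABLE[bits] + ']' + text[-2:]
-- ===== Notes on version B (the rewrite author's own statement) =====
-- stated objective: alternative
-- what changed: Classifies each character once into a 4-bit class mask, OR-folds the masks in a single pass, and reads the finished flag string from a precomputed 16-entry lookup table instead of A's four any() scans and four conditional string appends.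
import Mathlib
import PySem

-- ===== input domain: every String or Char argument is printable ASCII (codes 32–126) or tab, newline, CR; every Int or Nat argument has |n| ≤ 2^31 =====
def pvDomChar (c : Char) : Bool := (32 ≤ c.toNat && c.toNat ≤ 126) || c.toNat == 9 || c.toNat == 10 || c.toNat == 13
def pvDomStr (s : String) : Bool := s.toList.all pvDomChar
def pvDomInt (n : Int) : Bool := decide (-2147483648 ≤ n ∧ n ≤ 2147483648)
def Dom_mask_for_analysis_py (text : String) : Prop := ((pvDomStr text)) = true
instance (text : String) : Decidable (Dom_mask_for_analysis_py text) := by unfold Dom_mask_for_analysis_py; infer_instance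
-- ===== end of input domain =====

-- B replaces A's four any() scans + four conditional appends by a single per-character
-- bitmask classification folded with OR and a 16-entry lookup table (objective: alternative).

-- ===== PORT A =====
def mask_for_analysis_py (text : String) : String :=
  let cs := text.toList
  if cs.length ≤ 8 then String.ofList (List.replicate cs.length '*')
  else
    let start := PySem.List.slice cs none (some 2)
    let ending := if cs.length > 4 then PySem.List.slice cs (some (-2)) none else []
    let middle_length : Int := (cs.length : Int) - (start.length : Int) - (ending.length : Int)
    let has_uppercase := cs.any (fun c => PySem.Chars.isupper c)
    let has_lowercase := cs.any (fun c => PySem.Chars.islower c)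
    let has_digits := cs.any (fun c => PySem.Chars.isdigit c)
    let has_special := cs.any (fun c => !PySem.Chars.isalnum c)
    let pattern := "[" ++ PySem.Int.toStr middle_length ++ "chars:"
    let pattern := if has_uppercase then pattern ++ "A" else pattern
    let pattern := if has_lowercase then pattern ++ "a" else pattern
    let pattern := if has_digits then pattern ++ "1" else pattern
    let pattern := if has_special then pattern ++ "!" else pattern
    let pattern := pattern ++ "]"
    String.ofList start ++ pattern ++ String.ofList ending

-- ===== PORT B =====
-- 16-entry lookup table: bit 1 = 'A', bit 2 = 'a', bit 4 = '1', bit 8 = '!'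
def flagTable : List String :=
  ["", "A", "a", "Aa", "1", "A1", "a1", "Aa1",
   "!", "A!", "a!", "Aa!", "1!", "A1!", "a1!", "Aa1!"]

def classifyChar (c : Char) : Nat :=
  if PySem.Chars.isupper c then 1
  else if PySem.Chars.islower c then 2
  else if PySem.Chars.isdigit c then 4
  else if PySem.Chars.isalnum c then 0
  else 8

def mask_for_analysis_py_alt (text : String) : String :=
  let cs := text.toList
  let n := cs.length
  if n ≤ 8 then String.ofList (List.replicate n '*')
  else
    let bits := cs.foldl (fun a c => a ||| classifyChar c) 0
    String.ofList (cs.take 2) ++ "[" ++ PySem.Int.toStr ((n : Int) - 4) ++ "chars:"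
      ++ PySem.List.pyGetD flagTable (bits : Int) "" ++ "]" ++ String.ofList (cs.drop (n - 2))

-- ===== PRECONDITION & SPEC =====
def Spec_mask_for_analysis_py (text : String) (out : String) : Prop := out = mask_for_analysis_py_alt text
instance (text : String) (out : String) : Decidable (Spec_mask_for_analysis_py text out) := by unfold Spec_mask_for_analysis_py; infer_instance

-- ===== CLAIM (what is proved, stated in full; the proofs are below) =====
def Claim_equal_mask_for_analysis_py : Prop := ∀ (text : String), Dom_mask_for_analysis_py text → Spec_mask_for_analysis_py text (mask_for_analysis_py text)

-- ===== LEMMAS AND PROOFS =====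
lemma classify_or (c : Char) (u l d s : Bool) :
    classifyChar c ||| ((if u then 1 else 0) ||| (if l then 2 else 0)
        ||| (if d then 4 else 0) ||| (if s then 8 else 0))
    = (if (PySem.Chars.isupper c || u) then 1 else 0)
      ||| (if (PySem.Chars.islower c || l) then 2 else 0)
      ||| (if (PySem.Chars.isdigit c || d) then 4 else 0)
      ||| (if (!PySem.Chars.isalnum c || s) then 8 else 0) := by
  have hud : ¬(PySem.Chars.isupper c = true ∧ PySem.Chars.islower c = true) := by
    simp [PySem.Chars.isupper, PySem.Chars.islower, Char.le_def, UInt32.le_iff_toNat_le]; omega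
  have hug : ¬(PySem.Chars.isupper c = true ∧ PySem.Chars.isdigit c = true) := by
    simp [PySem.Chars.isupper, PySem.Chars.isdigit, Char.le_def, UInt32.le_iff_toNat_le]; omega
  have hlg : ¬(PySem.Chars.islower c = true ∧ PySem.Chars.isdigit c = true) := by
    simp [PySem.Chars.islower, PySem.Chars.isdigit, Char.le_def, UInt32.le_iff_toNat_le]; omega
  cases hu : PySem.Chars.isupper c <;> cases hl : PySem.Chars.islower c <;>
    cases hd : PySem.Chars.isdigit c <;>
    simp_all [classifyChar, PySem.Chars.isalnum, PySem.Chars.isalpha] <;>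
    cases u <;> cases l <;> cases d <;> cases s <;> decide

lemma foldl_classify (cs : List Char) : ∀ b : Nat,
    cs.foldl (fun a c => a ||| classifyChar c) b
    = b ||| ((if cs.any (fun c => PySem.Chars.isupper c) then 1 else 0)
        ||| (if cs.any (fun c => PySem.Chars.islower c) then 2 else 0)
        ||| (if cs.any (fun c => PySem.Chars.isdigit c) then 4 else 0)
        ||| (if cs.any (fun c => !PySem.Chars.isalnum c) then 8 else 0)) := by
  induction cs with
  | nil => intro b; simp
  | cons c rest ih =>
    intro b
    rw [List.foldl_cons, ih, Nat.lor_assoc, classify_or]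
    simp [Bool.or_comm]

-- ===== VERDICT (by name: the statement is the Claim_ definition above) =====
theorem mask_for_analysis_py_spec : Claim_equal_mask_for_analysis_py := by
  intro text _
  unfold Spec_mask_for_analysis_py mask_for_analysis_py mask_for_analysis_py_alt
  set cs := text.toList with hcs
  by_cases h : cs.length ≤ 8
  · simp [h]
  · simp only [h, if_false, foldl_classify, Nat.zero_or]
    have hstart : PySem.List.slice cs none (some 2) = cs.take 2 := by
      rw [show (2 : Int) = ((2 : Nat) : Int) by norm_num, PySem.List.slice_to_natCast]
    have hend : PySem.List.slice cs (some (-2)) none = cs.drop (cs.length - 2) := by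
      rw [PySem.List.slice_from_neg_ofNat cs 2 (by omega)]
    have hlen4 : cs.length > 4 := by omega
    simp only [hlen4, if_true, hstart, hend]
    have hls : (cs.take 2).length = 2 := by simp; omega
    have hle : (cs.drop (cs.length - 2)).length = 2 := by simp; omega
    have hmid : (cs.length : Int) - ((cs.take 2).length : Int) -
        ((cs.drop (cs.length - 2)).length : Int) = (cs.length : Int) - 4 := by
      rw [hls, hle]; ring
    rw [hmid]
    cases cs.any (fun c => PySem.Chars.isupper c) <;>
      cases cs.any (fun c => PySem.Chars.islower c) <;>
      cases cs.any (fun c => PySem.Chars.isdigit c) <;>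
      cases cs.any (fun c => !PySem.Chars.isalnum c) <;>
      simp [flagTable, PySem.List.pyGetD, String.append_assoc]
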